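-- pv_equiv track=rewrite | github.com/EXC3ll3NTrhyTHM/vertex-k-labeling | src/graph_generator.py | generate_circulant_graph
-- ===== SOURCE A (Python) =====
-- import collections
-- from typing import Dict, List, Any
--
-- def generate_circulant_graph(n: int, r: int) -> Dict[int, List[int]]:
--     """
--     Generate a circulant graph by removing edges from the complete circulant K_n to reduce each vertex's degree by 5.
--
--     Only valid for even n ≥ 6. It removes generators s=1,2,n/2 in that order.
--     Final degree = (n-1) - 5 = n - 6.
--
--     Args:
--         n (int): number of vertices (5 ≤ n ≤ 50).
--         r (int): ignored.
--
--     Returns: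
--         adjacency list mapping vertex id to list of neighbor ids; empty for invalid inputs.
--
--     References:
--         - ai-docs/algorithms/circulant_graph_generation_algorithm.md  (circulant graph generation logic)
--         - ai-docs/enhancments/enhancement03_circulant_graph.md  (improvements and edge-removal strategy)
--     """
--     # Validate n even and sufficient size
--     if not (6 <= n <= 50 and n % 2 == 0):
--         return collections.defaultdict(list)
--     graph = collections.defaultdict(list)
--     half = n // 2
--     # Step 1: build complete circulant K_n adjacency
--     for s in range(1, half + 1):
--         for i in range(n):
--             j = (i + s) % n
--             graph[i].append(j)
--             graph[j].append(i)
--     # Step 2: remove closest neighbor edges first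
--     for s in (1, 2, half):
--         for i in range(n):
--             j = (i + s) % n
--             # remove edge i<->j if exists
--             if j in graph[i]:
--                 graph[i].remove(j)
--             if i in graph[j]:
--                 graph[j].remove(i)
--     return graph
-- ===== SOURCE B (Python) =====
-- import collections
-- from typing import Dict, List
--
--
-- def generate_circulant_graph(n: int, r: int) -> Dict[int, List[int]]:
--     """Build the same graph directly: removing generators 1, 2 and n/2 from the
--     complete circulant leaves exactly the circulant with generators 3..n/2-1,
--     with the same key and neighbor ordering."""
--     if not (6 <= n <= 50 and n % 2 == 0):
--         return collections.defaultdict(list)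
--     graph = collections.defaultdict(list)
--     # materialize every vertex key (there may be no edges at all, e.g. n = 6)
--     for i in range(n):
--         graph[i]
--     for s in range(3, n // 2):
--         for i in range(n):
--             j = (i + s) % n
--             graph[i].append(j)
--             graph[j].append(i)
--     return graph
-- ===== Notes on version B (the rewrite author's own statement) =====
-- stated objective: simpler
-- what changed: B builds the surviving circulant with generators 3..n/2-1 directly in one pass (after materializing all vertex keys), instead of building the complete circulant K_n and then pruning the s=1,2,n/2 edges with membership tests and list.remove scans.
import Mathlib
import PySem

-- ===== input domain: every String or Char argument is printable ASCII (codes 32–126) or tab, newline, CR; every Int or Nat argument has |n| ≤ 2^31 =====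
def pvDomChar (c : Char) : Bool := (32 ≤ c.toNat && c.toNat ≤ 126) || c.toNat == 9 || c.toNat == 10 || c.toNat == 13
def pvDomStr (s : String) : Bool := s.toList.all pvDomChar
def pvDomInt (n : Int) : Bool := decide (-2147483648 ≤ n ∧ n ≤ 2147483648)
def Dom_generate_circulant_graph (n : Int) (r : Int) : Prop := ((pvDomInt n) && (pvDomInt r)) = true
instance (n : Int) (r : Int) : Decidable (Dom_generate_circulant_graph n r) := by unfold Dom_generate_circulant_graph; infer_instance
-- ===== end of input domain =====

-- B replaces A's build-then-prune (build complete circulant, then delete the s=1,2,n/2 edges)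
-- by a direct one-pass construction of the surviving circulant with generators 3..n/2-1;
-- only the RETURN value is compared (A mutates no argument).

-- ===== PORT A =====
-- list.remove(x): drop the first occurrence (in A every call is guarded by a membership test)
def pvRemoveFirst (l : List Int) (x : Int) : List Int :=
  match l with
  | [] => []
  | y :: t => if y = x then t else y :: pvRemoveFirst t x

-- one iteration of A's prune loop body for (s, i): j = (i+s) % n; remove edge i<->j if present
def pvPruneStep (n : Int) (s : Int) (d : PySem.Dict Int (List Int)) (i : Int) : PySem.Dict Int (List Int) :=
  let j := PySem.Int.mod (i + s) n
  let d1 := if (d.getD i []).contains j then d.modify i [] (fun l => pvRemoveFirst l j) else d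
  if (d1.getD j []).contains i then d1.modify j [] (fun l => pvRemoveFirst l i) else d1

def generate_circulant_graph (n : Int) (r : Int) : List (Int × List Int) :=
  -- the Python returns a dict; per the type convention the port returns its items (insertion order)
  if ¬ (6 ≤ n ∧ n ≤ 50 ∧ PySem.Int.mod n 2 = 0) then ([] : List (Int × List Int))
  else
    let half := PySem.Int.floordiv n 2
    -- Step 1: build complete circulant K_n adjacency
    let g1 := (PySem.List.pyRange 1 (half + 1) 1).foldl (fun d s =>
        (PySem.List.pyRange 0 n 1).foldl (fun d i =>
          let j := PySem.Int.mod (i + s) n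
          (d.modify i [] (fun l => l ++ [j])).modify j [] (fun l => l ++ [i])) d)
      PySem.Dict.empty
    -- Step 2: remove closest neighbor edges first, s in (1, 2, half)
    let g2 := [1, 2, half].foldl (fun d s => (PySem.List.pyRange 0 n 1).foldl (pvPruneStep n s) d) g1
    g2.items

-- ===== PORT B =====
def generate_circulant_graph_alt (n : Int) (r : Int) : List (Int × List Int) :=
  if ¬ (6 ≤ n ∧ n ≤ 50 ∧ PySem.Int.mod n 2 = 0) then ([] : List (Int × List Int))
  else
    -- materialize every vertex key: `graph[i]` on a defaultdict inserts [] for a missing key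
    let g0 := (PySem.List.pyRange 0 n 1).foldl (fun d i => d.setdefault i []) PySem.Dict.empty
    let g := (PySem.List.pyRange 3 (PySem.Int.floordiv n 2) 1).foldl (fun d s =>
        (PySem.List.pyRange 0 n 1).foldl (fun d i =>
          let j := PySem.Int.mod (i + s) n
          (d.modify i [] (fun l => l ++ [j])).modify j [] (fun l => l ++ [i])) d)
      g0
    g.items

-- ===== PRECONDITION & SPEC =====
def Spec_generate_circulant_graph (n : Int) (r : Int) (out : List (Int × List Int)) : Prop := out = generate_circulant_graph_alt n r
instance (n : Int) (r : Int) (out : List (Int × List Int)) : Decidable (Spec_generate_circulant_graph n r out) := by unfold Spec_generate_circulant_graph; infer_instance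

-- ===== CLAIM (what is proved, stated in full; the proofs are below) =====
def Claim_equal_generate_circulant_graph : Prop := ∀ (n : Int) (r : Int), Dom_generate_circulant_graph n r → Spec_generate_circulant_graph n r (generate_circulant_graph n r)

-- ===== LEMMAS AND PROOFS =====

-- abbreviations for the proofs (not used by the ports)
def pvM (n x : Int) : Int := PySem.Int.mod x n

def pvBuildStep (d : PySem.Dict Int (List Int)) (p : Int × Int) : PySem.Dict Int (List Int) :=
  d.modify p.1 [] (fun l => l ++ [p.2])

-- the (key, appended value) pairs generated by one step-1 inner loop for generator s
def pvOpsFor (n s : Int) : List (Int × Int) :=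
  (PySem.List.pyRange 0 n 1).flatMap (fun i => [(i, pvM n (i + s)), (pvM n (i + s), i)])

-- adjacency list of v produced by the build loops over the generator list sl
def pvAdj (n v : Int) (sl : List Int) : List Int :=
  ((sl.flatMap (pvOpsFor n)).filter (fun p => p.1 == v)).map (fun p => p.2)

-- guarded first-occurrence removal (the effect of A's guarded list.remove)
def pvGRem (x : Int) (l : List Int) : List Int :=
  if l.contains x then pvRemoveFirst l x else l

-- effect of pvPruneStep at iteration i on the list stored at key v
def pvActOn (n s v : Int) (l : List Int) (i : Int) : List Int :=
  let j := pvM n (i + s)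
  let l1 := if i = v then pvGRem j l else l
  if j = v then pvGRem i l1 else l1

-- ---- flattening the build loops ----

theorem pvFlattenInner (n s : Int) (li : List Int) (d : PySem.Dict Int (List Int)) :
    li.foldl (fun d i =>
        let j := PySem.Int.mod (i + s) n
        (d.modify i [] (fun l => l ++ [j])).modify j [] (fun l => l ++ [i])) d
      = (li.flatMap (fun i => [(i, pvM n (i + s)), (pvM n (i + s), i)])).foldl pvBuildStep d := by
  induction li generalizing d with
  | nil => rfl
  | cons i t ih => simpa [pvBuildStep, pvM] using ih _

theorem pvFlattenOuter (n : Int) (sl : List Int) (d : PySem.Dict Int (List Int)) :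
    sl.foldl (fun d s =>
        (PySem.List.pyRange 0 n 1).foldl (fun d i =>
          let j := PySem.Int.mod (i + s) n
          (d.modify i [] (fun l => l ++ [j])).modify j [] (fun l => l ++ [i])) d) d
      = (sl.flatMap (pvOpsFor n)).foldl pvBuildStep d := by
  rw [List.foldl_flatMap]
  induction sl generalizing d with
  | nil => rfl
  | cons s t ih =>
      rw [List.foldl_cons, List.foldl_cons, pvFlattenInner n s _ d, ih]
      simp only [pvOpsFor]

-- getD of the flattened build loop
theorem pvBuild_getD (n v : Int) (sl : List Int) (d : PySem.Dict Int (List Int)) :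
    ((sl.flatMap (pvOpsFor n)).foldl pvBuildStep d).getD v [] = d.getD v [] ++ pvAdj n v sl := by
  simpa [pvBuildStep, pvAdj] using
    PySem.Dict.getD_foldl_modify_append (sl.flatMap (pvOpsFor n)) d v

-- ---- prune loop: locality on getD ----

def pvGmod (d : PySem.Dict Int (List Int)) (k x : Int) : PySem.Dict Int (List Int) :=
  if (d.getD k []).contains x then d.modify k [] (fun l => pvRemoveFirst l x) else d

theorem pvGmod_getD (d : PySem.Dict Int (List Int)) (k x v : Int) :
    (pvGmod d k x).getD v [] = if v = k then pvGRem x (d.getD v []) else d.getD v [] := by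
  unfold pvGmod pvGRem
  by_cases hvk : v = k
  · subst hvk
    by_cases h1 : (d.getD v []).contains x
    · rw [if_pos h1, PySem.Dict.getD_modify, if_pos rfl, if_pos rfl, if_pos h1]
    · rw [if_neg h1, if_pos rfl, if_neg h1]
  · by_cases h1 : (d.getD k []).contains x
    · rw [if_pos h1, PySem.Dict.getD_modify, if_neg hvk, if_neg hvk]
    · rw [if_neg h1, if_neg hvk]

theorem pvPruneStep_getD (n s v : Int) (d : PySem.Dict Int (List Int)) (i : Int) :
    (pvPruneStep n s d i).getD v [] = pvActOn n s v (d.getD v []) i := by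
  have hstep : pvPruneStep n s d i = pvGmod (pvGmod d i (PySem.Int.mod (i + s) n)) (PySem.Int.mod (i + s) n) i := rfl
  rw [hstep, pvGmod_getD, pvGmod_getD]
  simp only [pvActOn, pvM]
  by_cases hiv : i = v <;> by_cases hjv : PySem.Int.mod (i + s) n = v <;>
    simp [hiv, hjv, Ne.symm, eq_comm]

theorem pvPruneFold_getD (n s v : Int) (li : List Int) (d : PySem.Dict Int (List Int)) :
    ((li.foldl (pvPruneStep n s) d).getD v []) = li.foldl (pvActOn n s v) (d.getD v []) := by
  induction li generalizing d with
  | nil => rfl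
  | cons i t ih => simp [List.foldl_cons, ih, pvPruneStep_getD]

-- ---- gRem toolkit ----

theorem pvGRem_cons_self (x : Int) (t : List Int) : pvGRem x (x :: t) = t := by
  simp [pvGRem, pvRemoveFirst]

theorem pvGRem_cons_ne {y x : Int} (h : y ≠ x) (t : List Int) :
    pvGRem x (y :: t) = y :: pvGRem x t := by
  by_cases hm : x ∈ t <;> simp [pvGRem, pvRemoveFirst, h, hm, Ne.symm h]

theorem pvGRem_append_left {x : Int} {l₁ : List Int} (h : x ∉ l₁) (l₂ : List Int) :
    pvGRem x (l₁ ++ l₂) = l₁ ++ pvGRem x l₂ := by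
  induction l₁ with
  | nil => rfl
  | cons y t ih =>
      have hyx : y ≠ x := fun e => h (by simp [e])
      have hxt : x ∉ t := fun e => h (by simp [e])
      simp [pvGRem_cons_ne hyx, ih hxt]

theorem pvRemoveFirst_comm {x y : Int} (h : x ≠ y) (l : List Int) :
    pvRemoveFirst (pvRemoveFirst l x) y = pvRemoveFirst (pvRemoveFirst l y) x := by
  induction l with
  | nil => rfl
  | cons z t ih =>
      by_cases hx : z = x <;> by_cases hy : z = y <;>
        simp [pvRemoveFirst, hx, hy, ih] <;> simp_all [pvRemoveFirst]

theorem pvMem_removeFirst {x y : Int} (h : x ≠ y) (l : List Int) :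
    y ∈ pvRemoveFirst l x ↔ y ∈ l := by
  induction l with
  | nil => simp [pvRemoveFirst]
  | cons z t ih =>
      by_cases hx : z = x
      · subst hx
        simp [pvRemoveFirst]
        intro e; exact absurd e.symm h
      · simp [pvRemoveFirst, hx, ih]

theorem pvGRem_comm (x y : Int) (l : List Int) :
    pvGRem x (pvGRem y l) = pvGRem y (pvGRem x l) := by
  by_cases hxy : x = y
  · subst hxy; rfl
  · unfold pvGRem
    by_cases hx : x ∈ l <;> by_cases hy : y ∈ l <;>
      simp [hx, hy, pvMem_removeFirst hxy, pvMem_removeFirst (Ne.symm hxy),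
        pvRemoveFirst_comm hxy]

-- ---- two-hit evaluation lemmas ----

theorem pvFoldlTwoHits (f : List Int → Int → List Int) (a b : Int)
    (fa fb : List Int → List Int)
    (hcomm : ∀ l, fa (fb l) = fb (fa l))
    (hab : a ≠ b) :
    ∀ li : List Int, li.Nodup →
      (∀ l, f l a = fa l) → (∀ l, f l b = fb l) →
      (∀ i ∈ li, i ≠ a → i ≠ b → ∀ l, f l i = l) →
      ∀ l0, li.foldl f l0 = (if b ∈ li then fb else id) ((if a ∈ li then fa else id) l0) := by
  intro li
  induction li with
  | nil => intro _ _ _ _ l0; simp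
  | cons i t ih =>
      intro hnd hfa hfb hid l0
      have hndt : t.Nodup := hnd.of_cons
      have hit : i ∉ t := by simp at hnd; exact hnd.1
      have hidt : ∀ i ∈ t, i ≠ a → i ≠ b → ∀ l, f l i = l := fun i hi => hid i (by simp [hi])
      by_cases hia : i = a
      · subst hia
        rw [List.foldl_cons, hfa, ih hndt hfa hfb hidt]
        have hb : (b ∈ i :: t) = (b ∈ t) := by simp [Ne.symm hab]
        simp [hit, hb]
      · by_cases hib : i = b
        · subst hib
          rw [List.foldl_cons, hfb, ih hndt hfa hfb hidt]
          have ha : (a ∈ i :: t) = (a ∈ t) := by simp [hab]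
          by_cases hat : a ∈ t <;> simp [hit, ha, hat, hcomm]
        · rw [List.foldl_cons, hid i (by simp) hia hib, ih hndt hfa hfb hidt]
          simp [Ne.symm hia, Ne.symm hib]

theorem pvFlatMapOneHit (F : Int → List Int) (b : Int) :
    ∀ li : List Int, li.Nodup → b ∈ li → (∀ i ∈ li, i ≠ b → F i = []) → li.flatMap F = F b := by
  intro li
  induction li with
  | nil => simp
  | cons i t ih =>
      intro hnd hb hF
      have hit : i ∉ t := by simp at hnd; exact hnd.1
      by_cases hib : i = b
      · subst hib
        have hnil : t.flatMap F = [] :=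
          List.flatMap_eq_nil_iff.mpr (fun x hx => hF x (by simp [hx]) (fun e => hit (e ▸ hx)))
        simp [hnil]
      · have hbt : b ∈ t := by
          rcases List.mem_cons.mp hb with h | h
          · exact absurd h.symm hib
          · exact h
        simp [hF i (by simp) hib, ih hnd.of_cons hbt (fun x hx hxb => hF x (by simp [hx]) hxb)]

theorem pvFlatMapTwoHits (F : Int → List Int) (a b : Int) (hab : a ≠ b) :
    ∀ li : List Int, li.Nodup → a ∈ li → b ∈ li →
      (∀ i ∈ li, i ≠ a → i ≠ b → F i = []) →
      li.flatMap F = F a ++ F b ∨ li.flatMap F = F b ++ F a := by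
  intro li
  induction li with
  | nil => simp
  | cons i t ih =>
      intro hnd ha hb hF
      have hit : i ∉ t := by simp at hnd; exact hnd.1
      by_cases hia : i = a
      · subst hia
        have hbt : b ∈ t := by
          rcases List.mem_cons.mp hb with h | h
          · exact absurd h.symm hab
          · exact h
        have : t.flatMap F = F b :=
          pvFlatMapOneHit F b t hnd.of_cons hbt
            (fun x hx hxb => hF x (by simp [hx]) (fun e => hit (e ▸ hx)) hxb)
        exact Or.inl (by simp [this])
      · by_cases hib : i = b
        · subst hib
          have hat : a ∈ t := by
            rcases List.mem_cons.mp ha with h | h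
            · exact absurd h.symm hia
            · exact h
          have : t.flatMap F = F a :=
            pvFlatMapOneHit F a t hnd.of_cons hat
              (fun x hx hxa => hF x (by simp [hx]) hxa (fun e => hit (e ▸ hx)))
          exact Or.inr (by simp [this])
        · have hat : a ∈ t := by
            rcases List.mem_cons.mp ha with h | h
            · exact absurd h.symm hia
            · exact h
          have hbt : b ∈ t := by
            rcases List.mem_cons.mp hb with h | h
            · exact absurd h.symm hib
            · exact h
          have h0 : F i = [] := hF i (by simp) hia hib
          have := ih hnd.of_cons hat hbt (fun x hx => hF x (by simp [hx]))
          simpa [h0] using this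

-- ---- modular arithmetic helpers ----

theorem pvDvdZero {n c : Int} (h2 : -n < c) (h3 : c < n) (hd : n ∣ c) : c = 0 := by
  rcases hd with ⟨k, hk⟩
  subst hk
  rcases lt_trichotomy k 0 with hneg | h0 | hpos
  · have : n * k ≤ n * (-1) := by
      have hn : 0 < n := by nlinarith
      exact mul_le_mul_of_nonneg_left (by omega) hn.le
    linarith
  · simp [h0]
  · have hn : 0 < n := by nlinarith
    have : n * 1 ≤ n * k := mul_le_mul_of_nonneg_left (by omega) hn.le
    linarith

theorem pvModNeq {n : Int} {a b : Int} (hne : a ≠ b) (h2 : -n < a - b) (h3 : a - b < n) (v : Int) :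
    (v + a) % n ≠ (v + b) % n := by
  intro h
  have h0 : ((v + a) - (v + b)) % n = 0 := Int.emod_eq_emod_iff_emod_sub_eq_zero.mp h
  have h0' : (a - b) % n = 0 := by rw [show (v + a) - (v + b) = a - b by ring] at h0; exact h0
  exact hne (by linarith [pvDvdZero h2 h3 (Int.dvd_of_emod_eq_zero h0')])

theorem pvModEq {n a b : Int} (hd : n ∣ (a - b)) (v : Int) : (v + a) % n = (v + b) % n := by
  rw [Int.emod_eq_emod_iff_emod_sub_eq_zero, show (v + a) - (v + b) = a - b by ring]
  exact Int.emod_eq_zero_of_dvd hd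

theorem pvHitChar {n s v : Int} (hv0 : 0 ≤ v) (hvn : v < n) {i : Int} (hi0 : 0 ≤ i) (hin : i < n) :
    (i + s) % n = v ↔ i = (v - s) % n := by
  have key : ∀ X c : Int, (X % n - c) % n = (X - c) % n := by
    intro X c
    conv_lhs => rw [Int.sub_emod, Int.emod_emod_of_dvd _ dvd_rfl, ← Int.sub_emod]
  constructor
  · intro h
    rw [← h, key, show i + s - s = i by ring, Int.emod_eq_of_lt hi0 hin]
  · intro h
    rw [h, Int.emod_add_emod, show v - s + s = v by ring, Int.emod_eq_of_lt hv0 hvn]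

theorem pvModMem {n : Int} (hn : 0 < n) (x : Int) : (x % n) ∈ PySem.List.pyRange 0 n 1 :=
  PySem.List.mem_pyRange_one.mpr ⟨Int.emod_nonneg x (by omega), Int.emod_lt_of_pos x hn⟩

-- ---- removal computations ----

theorem pvPairRemove {x y : Int} (hxy : x ≠ y) {c : List Int} (rest : List Int)
    (hc : c = [x, y] ∨ c = [y, x]) : pvGRem y (pvGRem x (c ++ rest)) = rest := by
  rcases hc with hc | hc <;> subst hc
  · rw [show ([x, y] : List Int) ++ rest = x :: (y :: rest) by simp,
      pvGRem_cons_self, pvGRem_cons_self]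
  · rw [show ([y, x] : List Int) ++ rest = y :: (x :: rest) by simp,
      pvGRem_cons_ne (Ne.symm hxy), pvGRem_cons_self, pvGRem_cons_self]

theorem pvDoubleRemove {x : Int} {mid : List Int} (hx : x ∉ mid) :
    pvGRem x (pvGRem x (mid ++ [x, x])) = mid := by
  rw [pvGRem_append_left hx, show ([x, x] : List Int) = x :: [x] by simp, pvGRem_cons_self,
    pvGRem_append_left hx, pvGRem_cons_self, List.append_nil]

-- ---- contribution of a single generator to vertex v's adjacency list ----

def pvContrib (n s v : Int) : List Int :=
  ((pvOpsFor n s).filter (fun p => p.1 == v)).map (fun p => p.2)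

theorem pvAdj_append (n v : Int) (l1 l2 : List Int) :
    pvAdj n v (l1 ++ l2) = pvAdj n v l1 ++ pvAdj n v l2 := by
  simp [pvAdj, List.flatMap_append, List.filter_append]

theorem pvAdj_cons (n v s : Int) (l : List Int) :
    pvAdj n v (s :: l) = pvContrib n s v ++ pvAdj n v l := by
  simp [pvAdj, pvContrib, List.filter_append]

theorem pvAdj_singleton (n v s : Int) : pvAdj n v [s] = pvContrib n s v := by
  simp [pvAdj, pvContrib]

theorem pvContrib_eval {n s v : Int} (hn : 0 < n) (hv0 : 0 ≤ v) (hvn : v < n)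
    (hs0 : 0 < s) (hsn : s < n) :
    pvContrib n s v = [(v + s) % n, (v - s) % n] ∨
      pvContrib n s v = [(v - s) % n, (v + s) % n] := by
  have hMeq : ∀ x : Int, pvM n x = x % n := fun x => PySem.Int.mod_eq_emod_of_pos hn
  have hflat : pvContrib n s v = (PySem.List.pyRange 0 n 1).flatMap
      (fun i => ([(i, (i + s) % n), ((i + s) % n, i)].filter (fun p => p.1 == v)).map (fun p => p.2)) := by
    simp only [pvContrib, pvOpsFor, hMeq, List.filter_flatMap, List.map_flatMap]
  have hb0 : (0:Int) ≤ (v - s) % n := Int.emod_nonneg _ (by omega)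
  have hbn : (v - s) % n < n := Int.emod_lt_of_pos _ hn
  have hbv : (v - s) % n ≠ v := by
    intro h
    have : (v + -s) % n = (v + 0) % n := by
      rw [show v + -s = v - s by ring, h, show v + 0 = v from by ring, Int.emod_eq_of_lt hv0 hvn]
    exact pvModNeq (by omega) (by omega) (by omega) v this
  have hxv : (v + s) % n ≠ v := by
    intro h
    have : (v + s) % n = (v + 0) % n := by
      rw [h, show v + 0 = v from by ring, Int.emod_eq_of_lt hv0 hvn]
    exact pvModNeq (by omega) (by omega) (by omega) v this
  have h1 : ((v - s) % n + s) % n = v := by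
    rw [Int.emod_add_emod, show v - s + s = v by ring, Int.emod_eq_of_lt hv0 hvn]
  rw [hflat]
  have := pvFlatMapTwoHits
    (fun i => ([(i, (i + s) % n), ((i + s) % n, i)].filter (fun p => p.1 == v)).map (fun p => p.2))
    v ((v - s) % n) (Ne.symm hbv) (PySem.List.pyRange 0 n 1)
    (PySem.List.nodup_pyRange_one 0 n)
    (PySem.List.mem_pyRange_one.mpr ⟨hv0, hvn⟩)
    (PySem.List.mem_pyRange_one.mpr ⟨hb0, hbn⟩)
    (by
      intro i hi hiv hib
      obtain ⟨hi0, hin⟩ := PySem.List.mem_pyRange_one.mp hi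
      have hjv : (i + s) % n ≠ v := fun h => hib ((pvHitChar hv0 hvn hi0 hin).mp h)
      simp [hiv, hjv])
  rcases this with h | h
  · refine Or.inl ?_
    rw [h]; beta_reduce; simp [hxv, hbv, h1]
  · refine Or.inr ?_
    rw [h]; beta_reduce; simp [hxv, hbv, h1]

-- elements contributed by the middle generators 3..half-1
theorem pvMem_mid {n v x : Int} (hn : 0 < n) (hv0 : 0 ≤ v) (hvn : v < n)
    (hx : x ∈ pvAdj n v (PySem.List.pyRange 3 (n / 2) 1)) :
    ∃ s', 3 ≤ s' ∧ s' < n / 2 ∧ (x = (v + s') % n ∨ x = (v - s') % n) := by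
  have hMeq : ∀ y : Int, pvM n y = y % n := fun y => PySem.Int.mod_eq_emod_of_pos hn
  simp only [pvAdj, List.mem_map, List.mem_filter, List.mem_flatMap, pvOpsFor, hMeq] at hx
  obtain ⟨p, ⟨⟨s', hs', ⟨i, hi, hpi⟩⟩, hkey⟩, hval⟩ := hx
  obtain ⟨hs3, hsh⟩ := PySem.List.mem_pyRange_one.mp hs'
  obtain ⟨hi0, hin⟩ := PySem.List.mem_pyRange_one.mp hi
  have hkey' : p.1 = v := by simpa using hkey
  refine ⟨s', hs3, hsh, ?_⟩
  rcases List.mem_cons.mp hpi with hpi | hpi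
  · subst hpi; simp only at hkey' hval; subst hkey'; exact Or.inl hval.symm
  · rcases List.mem_cons.mp hpi with hpi | hpi
    · subst hpi
      simp only at hkey' hval
      have : i = (v - s') % n := (pvHitChar hv0 hvn hi0 hin).mp hkey'
      exact Or.inr (by rw [← hval, this])
    · simp at hpi

-- ---- keys of the built dictionaries ----

theorem pvSet_add_of_mem {s : List Int} {x : Int} (h : x ∈ s) : PySem.Set.add s x = s := by
  simp [PySem.Set.add, h]

theorem pvSet_add_of_not_mem {s : List Int} {x : Int} (h : x ∉ s) :
    PySem.Set.add s x = s ++ [x] := by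
  simp [PySem.Set.add, h]

theorem pvSet_update_no_new : ∀ (l : List Int) (acc : List Int),
    (∀ x ∈ l, x ∈ acc) → PySem.Set.update acc l = acc := by
  intro l
  induction l with
  | nil => intro acc _; rfl
  | cons x t ih =>
      intro acc h
      have : PySem.Set.update acc (x :: t) = PySem.Set.update (PySem.Set.add acc x) t := rfl
      rw [this, pvSet_add_of_mem (h x (by simp))]
      exact ih acc (fun y hy => h y (by simp [hy]))

theorem pvSet_update_nodup : ∀ (l : List Int) (acc : List Int),
    (acc ++ l).Nodup → PySem.Set.update acc l = acc ++ l := by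
  intro l
  induction l with
  | nil => intro acc _; simp [PySem.Set.update]
  | cons x t ih =>
      intro acc h
      have hx : x ∉ acc := by
        intro hx
        have := List.disjoint_of_nodup_append h
        exact this hx (by simp)
      have : PySem.Set.update acc (x :: t) = PySem.Set.update (PySem.Set.add acc x) t := rfl
      rw [this, pvSet_add_of_not_mem hx, ih (acc ++ [x]) (by simpa using h)]
      simp

theorem pvSetdefault_keys : ∀ (li : List Int) (d : PySem.Dict Int (List Int)),
    (li.foldl (fun d i => d.setdefault i []) d).keys = PySem.Set.update d.keys li := by
  intro li
  induction li with
  | nil => intro d; rfl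
  | cons i t ih =>
      intro d
      rw [List.foldl_cons, ih]
      have : PySem.Set.update d.keys (i :: t) = PySem.Set.update (PySem.Set.add d.keys i) t := rfl
      rw [this]
      congr 1
      rw [PySem.Dict.keys_setdefault]
      by_cases hc : d.contains i = true
      · rw [if_pos hc, pvSet_add_of_mem ((PySem.Dict.contains_iff_mem_keys d i).mp hc)]
      · rw [if_neg hc, pvSet_add_of_not_mem
          (fun hm => hc ((PySem.Dict.contains_iff_mem_keys d i).mpr hm))]

theorem pvSetdefault_getD : ∀ (li : List Int) (d : PySem.Dict Int (List Int)) (v : Int),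
    (li.foldl (fun d i => d.setdefault i []) d).getD v [] = d.getD v [] := by
  intro li
  induction li with
  | nil => intro d v; rfl
  | cons i t ih =>
      intro d v
      rw [List.foldl_cons, ih]
      by_cases hvi : v = i
      · subst hvi; exact PySem.Dict.getD_setdefault_self d v [] []
      · rw [PySem.Dict.getD_eq_get?_getD, PySem.Dict.get?_setdefault_of_ne d [] hvi,
          ← PySem.Dict.getD_eq_get?_getD]

theorem pvGmod_keys (d : PySem.Dict Int (List Int)) (k x : Int) :
    (pvGmod d k x).keys = d.keys := by
  unfold pvGmod
  by_cases h : (d.getD k []).contains x = true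
  · rw [if_pos h]
    have hc : d.contains k = true := by
      by_contra hc
      rw [PySem.Dict.getD_of_not_contains d [] (by simpa using hc)] at h
      simp at h
    rw [PySem.Dict.keys_modify, PySem.Dict.keys_insert_of_contains]
    exact hc
  · rw [if_neg h]

theorem pvPruneStep_keys (n s : Int) (d : PySem.Dict Int (List Int)) (i : Int) :
    (pvPruneStep n s d i).keys = d.keys := by
  have hstep : pvPruneStep n s d i
      = pvGmod (pvGmod d i (PySem.Int.mod (i + s) n)) (PySem.Int.mod (i + s) n) i := rfl
  rw [hstep, pvGmod_keys, pvGmod_keys]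

theorem pvPruneFold_keys (n s : Int) : ∀ (li : List Int) (d : PySem.Dict Int (List Int)),
    (li.foldl (pvPruneStep n s) d).keys = d.keys := by
  intro li
  induction li with
  | nil => intro d; rfl
  | cons i t ih => intro d; rw [List.foldl_cons, ih, pvPruneStep_keys]

theorem pvBuild_keys (ops : List (Int × Int)) (d : PySem.Dict Int (List Int)) :
    (ops.foldl pvBuildStep d).keys = PySem.Set.update d.keys (ops.map Prod.fst) := by
  simpa [pvBuildStep] using
    PySem.Dict.keys_foldl_modify_key ops Prod.fst [] (fun _ p l => l ++ [p.2]) d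

theorem pvOpsFor_fst_mem {n s : Int} (hn : 0 < n) :
    ∀ x ∈ (pvOpsFor n s).map Prod.fst, x ∈ PySem.List.pyRange 0 n 1 := by
  intro x hx
  simp only [pvOpsFor, List.map_flatMap, List.mem_flatMap] at hx
  obtain ⟨i, hi, hxi⟩ := hx
  simp only [List.map_cons, List.map_nil, List.mem_cons] at hxi
  rcases hxi with h | h | h
  · exact h ▸ hi
  · rw [h, pvM, PySem.Int.mod_eq_emod_of_pos hn]
    exact pvModMem hn _
  · simp at h

theorem pvKeys1 (n : Int) (hn : 2 ≤ n) :
    ∀ k : Nat, 1 ≤ k → (k : Int) ≤ n →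
      PySem.Set.update ([] : List Int)
          ((PySem.List.pyRange 0 (k : Int) 1).flatMap (fun i => [i, (i + 1) % n]))
        = PySem.List.pyRange 0 (min ((k : Int) + 1) n) 1 := by
  intro k
  induction k with
  | zero => intro h; omega
  | succ k ih =>
      intro _ hkn
      push_cast at hkn ⊢
      by_cases hk0 : k = 0
      · subst hk0
        norm_num
        have h1n : (1:Int) % n = 1 := Int.emod_eq_of_lt (by norm_num) (by omega)
        have hr1 : PySem.List.pyRange 0 1 1 = [0] := by decide
        have hmin : min (2:Int) n = 2 := min_eq_left (by omega)
        rw [hr1, hmin]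
        have hr2 : PySem.List.pyRange 0 2 1 = [0, 1] := by decide
        rw [hr2]
        simp only [List.flatMap_cons, List.flatMap_nil, List.append_nil, zero_add, h1n]
        rw [pvSet_update_nodup [0, 1] [] (by simp)]
        rfl
      · have hk1 : 1 ≤ k := by omega
        have hkn' : (k : Int) ≤ n := by omega
        have hrs : PySem.List.pyRange 0 ((k : Int) + 1) 1
            = PySem.List.pyRange 0 (k : Int) 1 ++ [(k : Int)] :=
          PySem.List.pyRange_one_succ_right (by positivity)
        rw [hrs, List.flatMap_append]
        have hupd : ∀ (l1 l2 : List Int) (acc : List Int),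
            PySem.Set.update acc (l1 ++ l2) = PySem.Set.update (PySem.Set.update acc l1) l2 :=
          fun l1 l2 acc => List.foldl_append
        rw [hupd, ih hk1 hkn']
        have hminK : min ((k : Int) + 1) n = (k : Int) + 1 := min_eq_left (by omega)
        rw [hminK]
        simp only [List.flatMap_cons, List.flatMap_nil, List.append_nil]
        have hstep : ∀ acc : List Int, ∀ a b : Int, PySem.Set.update acc [a, b]
            = PySem.Set.add (PySem.Set.add acc a) b := fun _ _ _ => rfl
        rw [hstep, pvSet_add_of_mem (PySem.List.mem_pyRange_one.mpr ⟨by positivity, by omega⟩)]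
        by_cases hlt : (k : Int) + 1 < n
        · have hmod : ((k : Int) + 1) % n = (k : Int) + 1 := Int.emod_eq_of_lt (by positivity) hlt
          rw [hmod, pvSet_add_of_not_mem (by
            intro hm
            have := PySem.List.mem_pyRange_one.mp hm
            omega)]
          rw [← PySem.List.pyRange_one_succ_right (by positivity)]
          have : min ((k : Int) + 1 + 1) n = (k : Int) + 1 + 1 := min_eq_left (by omega)
          rw [this]
        · have hkeq : (k : Int) + 1 = n := by omega
          rw [hkeq, Int.emod_self]
          rw [pvSet_add_of_mem (PySem.List.mem_pyRange_one.mpr ⟨le_refl 0, by omega⟩)]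
          have : min (n + 1) n = n := min_eq_right (by omega)
          rw [this]

-- ---- effect of one prune pass (generator s) on vertex v's list ----

theorem pvPruneLoop_getD {n s v : Int} (hn : 0 < n) (hv0 : 0 ≤ v) (hvn : v < n)
    (hs0 : 0 < s) (hsn : s < n) (d : PySem.Dict Int (List Int)) :
    ((PySem.List.pyRange 0 n 1).foldl (pvPruneStep n s) d).getD v []
      = pvGRem ((v - s) % n) (pvGRem ((v + s) % n) (d.getD v [])) := by
  rw [pvPruneFold_getD]
  have hMeq : ∀ x : Int, pvM n x = x % n := fun x => PySem.Int.mod_eq_emod_of_pos hn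
  have hbv : (v - s) % n ≠ v := by
    intro h
    have : (v + -s) % n = (v + 0) % n := by
      rw [show v + -s = v - s by ring, h, show v + 0 = v from by ring, Int.emod_eq_of_lt hv0 hvn]
    exact pvModNeq (by omega) (by omega) (by omega) v this
  have hxv : (v + s) % n ≠ v := by
    intro h
    have : (v + s) % n = (v + 0) % n := by
      rw [h, show v + 0 = v from by ring, Int.emod_eq_of_lt hv0 hvn]
    exact pvModNeq (by omega) (by omega) (by omega) v this
  have h1 : ((v - s) % n + s) % n = v := by
    rw [Int.emod_add_emod, show v - s + s = v by ring, Int.emod_eq_of_lt hv0 hvn]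
  have hb0 : (0:Int) ≤ (v - s) % n := Int.emod_nonneg _ (by omega)
  have hbn : (v - s) % n < n := Int.emod_lt_of_pos _ hn
  have hfa : ∀ l, pvActOn n s v l v = pvGRem ((v + s) % n) l := by
    intro l
    simp only [pvActOn, pvM, PySem.Int.mod_eq_emod_of_pos hn]
    simp [hxv]
  have hfb : ∀ l, pvActOn n s v l ((v - s) % n) = pvGRem ((v - s) % n) l := by
    intro l
    simp only [pvActOn, pvM, PySem.Int.mod_eq_emod_of_pos hn]
    simp [h1, hbv]
  have hid : ∀ i ∈ PySem.List.pyRange 0 n 1, i ≠ v → i ≠ (v - s) % n → ∀ l,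
      pvActOn n s v l i = l := by
    intro i hi hiv hib l
    obtain ⟨hi0, hin⟩ := PySem.List.mem_pyRange_one.mp hi
    have hjv : (i + s) % n ≠ v := fun h => hib ((pvHitChar hv0 hvn hi0 hin).mp h)
    simp only [pvActOn, pvM, PySem.Int.mod_eq_emod_of_pos hn]
    simp [hiv, hjv]
  have := pvFoldlTwoHits (pvActOn n s v) v ((v - s) % n)
    (pvGRem ((v + s) % n)) (pvGRem ((v - s) % n))
    (fun l => pvGRem_comm _ _ l) (Ne.symm hbv)
    (PySem.List.pyRange 0 n 1) (PySem.List.nodup_pyRange_one 0 n)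
    hfa hfb hid (d.getD v [])
  rw [this, if_pos (PySem.List.mem_pyRange_one.mpr ⟨hb0, hbn⟩),
    if_pos (PySem.List.mem_pyRange_one.mpr ⟨hv0, hvn⟩)]

-- ---- the main equality on the valid inputs ----

theorem pvMain (n r : Int) (h6 : 6 ≤ n) (h50 : n ≤ 50) (hev : PySem.Int.mod n 2 = 0) :
    generate_circulant_graph n r = generate_circulant_graph_alt n r := by
  have hn : (0:Int) < n := by omega
  have hev' : n % 2 = 0 := by
    rw [PySem.Int.mod_eq_emod_of_pos (by norm_num : (0:Int) < 2)] at hev; exact hev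
  have hfd : PySem.Int.floordiv n 2 = n / 2 := PySem.Int.floordiv_eq_ediv_of_pos (by norm_num)
  have h2h : 2 * (n / 2) = n := by omega
  have h3h : 3 ≤ n / 2 := by omega
  have hhn : n / 2 < n := by omega
  unfold generate_circulant_graph generate_circulant_graph_alt
  rw [if_neg (not_not_intro ⟨h6, h50, hev⟩), if_neg (not_not_intro ⟨h6, h50, hev⟩)]
  simp only [hfd]
  rw [pvFlattenOuter, pvFlattenOuter]
  -- the two dictionaries
  have hKA1 : (((PySem.List.pyRange 1 (n / 2 + 1) 1).flatMap (pvOpsFor n)).foldl pvBuildStep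
      PySem.Dict.empty).keys = PySem.List.pyRange 0 n 1 := by
    rw [pvBuild_keys, PySem.Dict.keys_empty]
    rw [PySem.List.pyRange_one_cons (by omega : (1:Int) < n / 2 + 1)]
    rw [List.flatMap_cons, List.map_append]
    have hupd : ∀ (l1 l2 acc : List Int),
        PySem.Set.update acc (l1 ++ l2) = PySem.Set.update (PySem.Set.update acc l1) l2 :=
      fun l1 l2 acc => List.foldl_append
    rw [hupd]
    have hops1 : (pvOpsFor n 1).map Prod.fst
        = (PySem.List.pyRange 0 n 1).flatMap (fun i => [i, (i + 1) % n]) := by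
      simp [pvOpsFor, List.map_flatMap, pvM, PySem.Int.mod_eq_emod_of_pos hn]
    rw [hops1]
    have hk : ((n.toNat : Int)) = n := Int.toNat_of_nonneg (by omega)
    have := pvKeys1 n (by omega) n.toNat (by omega) (by omega)
    rw [hk] at this
    rw [this, min_eq_right (by omega)]
    apply pvSet_update_no_new
    intro x hx
    obtain ⟨p, hp, hxp⟩ := List.mem_map.mp hx
    obtain ⟨s', hs', hps⟩ := List.mem_flatMap.mp hp
    exact pvOpsFor_fst_mem hn x (List.mem_map.mpr ⟨p, hps, hxp⟩)
  have hKB0 : (((PySem.List.pyRange 0 n 1).foldl (fun d i => d.setdefault i [])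
      PySem.Dict.empty) : PySem.Dict Int (List Int)).keys = PySem.List.pyRange 0 n 1 := by
    rw [pvSetdefault_keys, PySem.Dict.keys_empty]
    simpa using pvSet_update_nodup (PySem.List.pyRange 0 n 1) []
      (by simpa using PySem.List.nodup_pyRange_one 0 n)
  have hKB : ((((PySem.List.pyRange 3 (n / 2) 1).flatMap (pvOpsFor n)).foldl pvBuildStep
      ((PySem.List.pyRange 0 n 1).foldl (fun d i => d.setdefault i []) PySem.Dict.empty)) :
        PySem.Dict Int (List Int)).keys = PySem.List.pyRange 0 n 1 := by
    rw [pvBuild_keys, hKB0]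
    apply pvSet_update_no_new
    intro x hx
    obtain ⟨p, hp, hxp⟩ := List.mem_map.mp hx
    obtain ⟨s', hs', hps⟩ := List.mem_flatMap.mp hp
    exact pvOpsFor_fst_mem hn x (List.mem_map.mpr ⟨p, hps, hxp⟩)
  simp only [List.foldl_cons, List.foldl_nil]
  have hKA : ((PySem.List.pyRange 0 n 1).foldl (pvPruneStep n (n / 2))
      ((PySem.List.pyRange 0 n 1).foldl (pvPruneStep n 2)
        ((PySem.List.pyRange 0 n 1).foldl (pvPruneStep n 1)
          (((PySem.List.pyRange 1 (n / 2 + 1) 1).flatMap (pvOpsFor n)).foldl pvBuildStep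
            PySem.Dict.empty)))).keys = PySem.List.pyRange 0 n 1 := by
    rw [pvPruneFold_keys, pvPruneFold_keys, pvPruneFold_keys, hKA1]
  rw [PySem.Dict.items_eq_map_keys _ (by rw [hKA]; exact PySem.List.nodup_pyRange_one 0 n) [],
    PySem.Dict.items_eq_map_keys _ (by rw [hKB]; exact PySem.List.nodup_pyRange_one 0 n) []]
  rw [hKA, hKB]
  apply List.map_congr_left
  intro v hv
  obtain ⟨hv0, hvn⟩ := PySem.List.mem_pyRange_one.mp hv
  simp only [Prod.mk.injEq, true_and]
  -- B side value
  rw [pvBuild_getD, pvSetdefault_getD, PySem.Dict.getD_empty]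
  -- A side value
  rw [pvPruneLoop_getD hn hv0 hvn (by omega) (by omega),
    pvPruneLoop_getD hn hv0 hvn (by omega) (by omega),
    pvPruneLoop_getD hn hv0 hvn (by omega) (by omega),
    pvBuild_getD, PySem.Dict.getD_empty]
  simp only [List.nil_append]
  -- split the generator range 1..n/2 into 1, 2, middle, n/2
  have hr1 : PySem.List.pyRange 1 (n / 2 + 1) 1 = 1 :: PySem.List.pyRange 2 (n / 2 + 1) 1 :=
    PySem.List.pyRange_one_cons (by omega)
  have hr2 : PySem.List.pyRange 2 (n / 2 + 1) 1 = 2 :: PySem.List.pyRange 3 (n / 2 + 1) 1 := by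
    have := PySem.List.pyRange_one_cons (show (2:Int) < n / 2 + 1 by omega)
    norm_num at this
    exact this
  have hr3 : PySem.List.pyRange 3 (n / 2 + 1) 1
      = PySem.List.pyRange 3 (n / 2) 1 ++ [n / 2] :=
    PySem.List.pyRange_one_succ_right (by omega)
  rw [hr1, hr2, hr3, pvAdj_cons, pvAdj_cons, pvAdj_append, pvAdj_singleton]
  -- names for the five removed values
  have hy1 : (v - 1) % n = (v + (-1)) % n := by rw [sub_eq_add_neg]
  have hy2 : (v - 2) % n = (v + (-2)) % n := by rw [sub_eq_add_neg]
  have hyh : (v - n / 2) % n = (v + n / 2) % n := by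
    rw [sub_eq_add_neg]
    exact pvModEq (⟨-1, by omega⟩ : n ∣ (-(n / 2) - n / 2)) v
  -- the middle part does not contain any of them
  have hnotmid : ∀ a : Int, -(n / 2) ≤ a → a ≤ n / 2 →
      (∀ s', 3 ≤ s' → s' < n / 2 → a ≠ s' ∧ a ≠ -s') →
      (v + a) % n ∉ pvAdj n v (PySem.List.pyRange 3 (n / 2) 1) := by
    intro a ha1 ha2 hdiff hmem
    obtain ⟨s', hs3, hsh, hcase⟩ := pvMem_mid hn hv0 hvn hmem
    obtain ⟨hd1, hd2⟩ := hdiff s' hs3 hsh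
    rcases hcase with he | he
    · exact pvModNeq (by omega) (by omega) (by omega) v he
    · rw [sub_eq_add_neg] at he
      exact pvModNeq (by omega) (by omega) (by omega) v he
  have hmh : (v + n / 2) % n ∉ pvAdj n v (PySem.List.pyRange 3 (n / 2) 1) :=
    hnotmid (n / 2) (by omega) (by omega) (fun s' h3 hh => by omega)
  -- distinctness of the removed pairs
  have hd1 : (v + 1) % n ≠ (v - 1) % n := by
    rw [hy1]; exact pvModNeq (by omega) (by omega) (by omega) v
  have hd2 : (v + 2) % n ≠ (v - 2) % n := by
    rw [hy2]; exact pvModNeq (by omega) (by omega) (by omega) v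
  -- evaluate the three removed contributions
  have hc1 := pvContrib_eval hn hv0 hvn (show (0:Int) < 1 by norm_num) (by omega)
  have hc2 := pvContrib_eval hn hv0 hvn (show (0:Int) < 2 by norm_num) (by omega)
  have hch : pvContrib n (n / 2) v = [(v + n / 2) % n, (v + n / 2) % n] := by
    rcases pvContrib_eval hn hv0 hvn (show (0:Int) < n / 2 by omega) (by omega) with h | h <;>
      rw [h, hyh]
  -- now remove them
  rw [pvPairRemove hd1 _ hc1, pvPairRemove hd2 _ hc2, hch, hyh, pvDoubleRemove hmh]
-- ===== VERDICT (by name: the statement is the Claim_ definition above) =====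
theorem generate_circulant_graph_spec : Claim_equal_generate_circulant_graph := by
  intro n r _
  unfold Spec_generate_circulant_graph
  by_cases h : 6 ≤ n ∧ n ≤ 50 ∧ PySem.Int.mod n 2 = 0
  · exact pvMain n r h.1 h.2.1 h.2.2
  · unfold generate_circulant_graph generate_circulant_graph_alt
    rw [if_pos h, if_pos h]
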